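-- pv_equiv track=rewrite | github.com/blackstonetech/Build-Night | TicTacToe/App/initialize.py | checkValidMove
-- ===== SOURCE A (Python) =====
-- def checkValidMove(board, intPosition):
--     count = 0
--     for i in range(0, 3):
--         for j in range(0, 3):
--             count +=1
--             if count == intPosition:
--                 if board[i][j] != 'X' and board[i][j] != 'O':
--                     return True
-- ===== SOURCE B (Python) =====
-- def checkValidMove(board, intPosition):
--     if 1 <= intPosition <= 9:
--         i, j = divmod(intPosition - 1, 3)
--         if board[i][j] != 'X' and board[i][j] != 'O':
--             return True
-- ===== Notes on version B (the rewrite author's own statement) =====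
-- stated objective: simpler
-- what changed: Replaced the nested 3x3 counting loop with a direct divmod index computation: the target cell is board[(p-1)//3][(p-1)%3] when 1<=p<=9, otherwise no cell is touched.
import Mathlib
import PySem

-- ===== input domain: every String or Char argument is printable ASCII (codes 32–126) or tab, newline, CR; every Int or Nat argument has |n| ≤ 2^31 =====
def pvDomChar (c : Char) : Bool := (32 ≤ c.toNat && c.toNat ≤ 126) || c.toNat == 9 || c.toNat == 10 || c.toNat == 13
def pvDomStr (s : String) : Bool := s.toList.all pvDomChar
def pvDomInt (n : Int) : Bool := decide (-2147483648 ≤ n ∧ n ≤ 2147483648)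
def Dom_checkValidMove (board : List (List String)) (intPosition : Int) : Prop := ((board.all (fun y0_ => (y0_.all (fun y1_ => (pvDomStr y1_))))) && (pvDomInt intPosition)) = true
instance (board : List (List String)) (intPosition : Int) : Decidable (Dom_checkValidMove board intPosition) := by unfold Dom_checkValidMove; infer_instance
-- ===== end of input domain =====

-- B replaces A's nested 3x3 counting loop by a direct divmod index computation (simpler, constant-time).

-- ===== PORT A =====
-- literal transliteration of A's nested loop with its running counter and early return,
-- carried as the fold state (count, result); once result is `some _` the loop body is inert.
-- board[i][j] is ported with pyGet?/getD; Pre_ excludes the inputs where Python's indexing raises.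
def checkValidMove (board : List (List String)) (intPosition : Int) : Option Bool :=
  ((PySem.List.pyRange 0 3 1).foldl (fun s i =>
    (PySem.List.pyRange 0 3 1).foldl (fun s j =>
      match s with
      | (count, some r) => (count + 1, some r)
      | (count, none) =>
        let count := count + 1
        if count = intPosition then
          let cell := (PySem.List.pyGet? ((PySem.List.pyGet? board i).getD []) j).getD ""
          if cell ≠ "X" ∧ cell ≠ "O" then (count, some true) else (count, none)
        else (count, none)) s) ((0 : Int), (none : Option Bool))).2

-- ===== PORT B =====
def checkValidMove_alt (board : List (List String)) (intPosition : Int) : Option Bool :=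
  if 1 ≤ intPosition ∧ intPosition ≤ 9 then
    let i := PySem.Int.floordiv (intPosition - 1) 3
    let j := PySem.Int.mod (intPosition - 1) 3
    let cell := (PySem.List.pyGet? ((PySem.List.pyGet? board i).getD []) j).getD ""
    if cell ≠ "X" ∧ cell ≠ "O" then some true else none
  else none

-- ===== PRECONDITION & SPEC =====
-- Pre_ excludes exactly the inputs where both Pythons raise IndexError: a position in 1..9
-- whose target cell does not exist on the (possibly ragged or too-small) board.
def Pre_checkValidMove (board : List (List String)) (intPosition : Int) : Prop :=
  1 ≤ intPosition → intPosition ≤ 9 →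
    (PySem.List.pyGet? ((PySem.List.pyGet? board (PySem.Int.floordiv (intPosition - 1) 3)).getD [])
      (PySem.Int.mod (intPosition - 1) 3)) ≠ none
instance (board : List (List String)) (intPosition : Int) : Decidable (Pre_checkValidMove board intPosition) := by unfold Pre_checkValidMove; infer_instance
def pvWitness_checkValidMove : List (List String) × Int :=
  ([[" ", "X", "O"], ["O", " ", "X"], ["X", "O", " "]], 5)

def Spec_checkValidMove (board : List (List String)) (intPosition : Int) (out : Option Bool) : Prop := out = checkValidMove_alt board intPosition
instance (board : List (List String)) (intPosition : Int) (out : Option Bool) : Decidable (Spec_checkValidMove board intPosition out) := by unfold Spec_checkValidMove; infer_instance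

-- ===== CLAIM (what is proved, stated in full; the proofs are below) =====
def Claim_equal_checkValidMove : Prop := ∀ (board : List (List String)) (intPosition : Int), Dom_checkValidMove board intPosition → Pre_checkValidMove board intPosition → Spec_checkValidMove board intPosition (checkValidMove board intPosition)

-- ===== LEMMAS AND PROOFS =====

-- ===== VERDICT (by name: the statement is the Claim_ definition above) =====
set_option maxHeartbeats 1000000 in
theorem checkValidMove_spec : Claim_equal_checkValidMove := by
  intro board intPosition _ _
  unfold Spec_checkValidMove checkValidMove checkValidMove_alt
  by_cases h : 1 ≤ intPosition ∧ intPosition ≤ 9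
  · obtain ⟨h1, h2⟩ := h
    by_cases hc : ((PySem.List.pyGet? ((PySem.List.pyGet? board (PySem.Int.floordiv (intPosition - 1) 3)).getD []) (PySem.Int.mod (intPosition - 1) 3)).getD "" ≠ "X" ∧ (PySem.List.pyGet? ((PySem.List.pyGet? board (PySem.Int.floordiv (intPosition - 1) 3)).getD []) (PySem.Int.mod (intPosition - 1) 3)).getD "" ≠ "O") <;>
    · interval_cases intPosition <;>
      · simp only [PySem.Int.floordiv, PySem.Int.mod, Int.reduceSub, Int.reduceFDiv, Int.reduceFMod] at hc
        simp only [show PySem.List.pyRange 0 3 1 = [(0:Int),1,2] from by decide, List.foldl]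
        simp [hc, PySem.Int.floordiv, PySem.Int.mod]
  · have n1 : ¬((1:Int) = intPosition) := by omega
    have n2 : ¬((2:Int) = intPosition) := by omega
    have n3 : ¬((3:Int) = intPosition) := by omega
    have n4 : ¬((4:Int) = intPosition) := by omega
    have n5 : ¬((5:Int) = intPosition) := by omega
    have n6 : ¬((6:Int) = intPosition) := by omega
    have n7 : ¬((7:Int) = intPosition) := by omega
    have n8 : ¬((8:Int) = intPosition) := by omega
    have n9 : ¬((9:Int) = intPosition) := by omega
    simp only [show PySem.List.pyRange 0 3 1 = [(0:Int),1,2] from by decide, List.foldl]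
    simp [h, n1, n2, n3, n4, n5, n6, n7, n8, n9]
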